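-- pv_equiv track=rewrite | github.com/chboishabba/animalexic | scripts/compare_oracle_runtime.py | _merge_oracle
-- ===== SOURCE A (Python) =====
-- from typing import Any
--
-- def _merge_oracle(summary_rows: dict[int, dict[str, Any]], receipt_rows: dict[int, dict[str, Any]]):
--     out: dict[int, dict[str, Any]] = {}
--     for frame_idx in sorted(set(summary_rows) | set(receipt_rows)):
--         merged = {}
--         merged.update(receipt_rows.get(frame_idx, {}))
--         merged.update(summary_rows.get(frame_idx, {}))
--         out[frame_idx] = merged
--     return out
-- ===== SOURCE B (Python) =====
-- def _merge_oracle(summary_rows, receipt_rows):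
--     s_items = sorted(summary_rows.items(), key=lambda p: p[0])
--     r_items = sorted(receipt_rows.items(), key=lambda p: p[0])
--     ns, nr = len(s_items), len(r_items)
--     out = {}
--     i = j = 0
--     while i < ns or j < nr:
--         if j >= nr or (i < ns and s_items[i][0] < r_items[j][0]):
--             k, srow = s_items[i]
--             i += 1
--             out[k] = dict(srow)
--         elif i >= ns or r_items[j][0] < s_items[i][0]:
--             k, rrow = r_items[j]
--             j += 1
--             out[k] = dict(rrow)
--         else:
--             k = s_items[i][0]
--             merged = dict(r_items[j][1])
--             merged.update(s_items[i][1])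
--             i += 1
--             j += 1
--             out[k] = merged
--     return out
-- ===== Notes on version B (the rewrite author's own statement) =====
-- stated objective: alternative
-- what changed: A iterates once over the sorted union of the two key sets, looking each frame up in both dicts with .get defaults; B sorts each dict's items separately and runs a two-pointer merge-join over the two sorted lists, emitting each output row directly (receipt copied then overridden by summary on a key tie).
import Mathlib
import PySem

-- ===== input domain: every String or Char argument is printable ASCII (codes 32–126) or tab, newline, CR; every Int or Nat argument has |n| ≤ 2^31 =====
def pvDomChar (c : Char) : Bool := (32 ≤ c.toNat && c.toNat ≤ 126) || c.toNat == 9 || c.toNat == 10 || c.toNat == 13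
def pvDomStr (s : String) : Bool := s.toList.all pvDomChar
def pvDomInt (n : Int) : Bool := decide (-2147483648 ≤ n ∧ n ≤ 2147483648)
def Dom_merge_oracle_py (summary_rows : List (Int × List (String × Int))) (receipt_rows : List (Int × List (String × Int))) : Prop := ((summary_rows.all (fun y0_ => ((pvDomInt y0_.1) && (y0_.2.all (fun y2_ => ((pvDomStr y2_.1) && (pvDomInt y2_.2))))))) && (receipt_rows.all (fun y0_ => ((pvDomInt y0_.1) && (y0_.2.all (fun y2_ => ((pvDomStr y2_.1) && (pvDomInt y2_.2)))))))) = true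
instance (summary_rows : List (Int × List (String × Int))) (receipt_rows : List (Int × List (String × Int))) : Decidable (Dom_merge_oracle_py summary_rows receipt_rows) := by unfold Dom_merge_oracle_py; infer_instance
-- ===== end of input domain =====

-- B replaces A's single pass over the sorted union of key sets by a sort-then-merge-join:
-- sort each dict's items once, then a two-pointer merge emits the output directly; same cost,
-- a genuinely different algorithm (merge-join instead of key-set union + repeated lookups).

-- ===== PORT A =====
-- out = {}; for frame_idx in sorted(set(summary_rows) | set(receipt_rows)):
--   merged = {}; merged.update(receipt_rows.get(frame_idx, {})); merged.update(summary_rows.get(frame_idx, {})); out[frame_idx] = merged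
def merge_oracle_py (summary_rows : List (Int × List (String × Int))) (receipt_rows : List (Int × List (String × Int))) : List (Int × List (String × Int)) :=
  let sd : PySem.Dict Int (List (String × Int)) := PySem.Dict.mk summary_rows
  let rd : PySem.Dict Int (List (String × Int)) := PySem.Dict.mk receipt_rows
  let frames := PySem.List.sorted
    (PySem.Set.union (PySem.Set.ofList (summary_rows.map (·.1))) (receipt_rows.map (·.1)))
    (fun x => x) false
  (frames.foldl
    (fun out idx =>
      out.insert idx ((((PySem.Dict.empty : PySem.Dict String Int).update (rd.getD idx [])).update (sd.getD idx [])).items))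
    (PySem.Dict.empty : PySem.Dict Int (List (String × Int)))).items

-- ===== PORT B =====
-- the while loop with the two cursors i, j: structural recursion on the two (sorted) item lists,
-- `out` is the accumulating dict; branch order exactly as in Source B
def pvJoin (s r : List (Int × List (String × Int))) (out : PySem.Dict Int (List (String × Int))) : PySem.Dict Int (List (String × Int)) :=
  match s, r with
  | [], [] => out
  | (k, srow) :: s', [] => pvJoin s' [] (out.insert k (PySem.Dict.ofList srow).items)
  | [], (k, rrow) :: r' => pvJoin [] r' (out.insert k (PySem.Dict.ofList rrow).items)
  | (ks, srow) :: s', (kr, rrow) :: r' =>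
    if ks < kr then pvJoin s' ((kr, rrow) :: r') (out.insert ks (PySem.Dict.ofList srow).items)
    else if kr < ks then pvJoin ((ks, srow) :: s') r' (out.insert kr (PySem.Dict.ofList rrow).items)
    else pvJoin s' r' (out.insert ks (((PySem.Dict.ofList rrow).update srow).items))
termination_by s.length + r.length

-- s_items = sorted(summary_rows.items(), key=fst); r_items likewise; then the merge-join loop
def merge_oracle_py_alt (summary_rows : List (Int × List (String × Int))) (receipt_rows : List (Int × List (String × Int))) : List (Int × List (String × Int)) :=
  let s_items := PySem.List.sorted summary_rows (·.1) false
  let r_items := PySem.List.sorted receipt_rows (·.1) false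
  (pvJoin s_items r_items (PySem.Dict.empty : PySem.Dict Int (List (String × Int)))).items

-- ===== PRECONDITION & SPEC =====
-- Pre_ requires the outer association lists to have distinct keys: the Python parameters are
-- dicts, so a list with duplicate frame indices does not represent any Python input at all.
def Pre_merge_oracle_py (summary_rows : List (Int × List (String × Int))) (receipt_rows : List (Int × List (String × Int))) : Prop :=
  (summary_rows.map (·.1)).Nodup ∧ (receipt_rows.map (·.1)).Nodup
instance (summary_rows : List (Int × List (String × Int))) (receipt_rows : List (Int × List (String × Int))) : Decidable (Pre_merge_oracle_py summary_rows receipt_rows) := by unfold Pre_merge_oracle_py; infer_instance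
def pvWitness_merge_oracle_py : (List (Int × List (String × Int))) × (List (Int × List (String × Int))) :=
  ([(1, [("a", 2)]), (3, [("b", 4)])], [(1, [("a", 9), ("c", 5)])])

def Spec_merge_oracle_py (summary_rows : List (Int × List (String × Int))) (receipt_rows : List (Int × List (String × Int))) (out : List (Int × List (String × Int))) : Prop := out = merge_oracle_py_alt summary_rows receipt_rows
instance (summary_rows : List (Int × List (String × Int))) (receipt_rows : List (Int × List (String × Int))) (out : List (Int × List (String × Int))) : Decidable (Spec_merge_oracle_py summary_rows receipt_rows out) := by unfold Spec_merge_oracle_py; infer_instance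

-- ===== CLAIM (what is proved, stated in full; the proofs are below) =====
def Claim_equal_merge_oracle_py : Prop := ∀ (summary_rows : List (Int × List (String × Int))) (receipt_rows : List (Int × List (String × Int))), Dom_merge_oracle_py summary_rows receipt_rows → Pre_merge_oracle_py summary_rows receipt_rows → Spec_merge_oracle_py summary_rows receipt_rows (merge_oracle_py summary_rows receipt_rows)

-- ===== LEMMAS AND PROOFS =====

-- list form of the merge-join (proof helper), same recursion as pvJoin without the dict
def pvMergeL (s r : List (Int × List (String × Int))) : List (Int × List (String × Int)) :=
  match s, r with
  | [], [] => []
  | (k, srow) :: s', [] => (k, (PySem.Dict.ofList srow).items) :: pvMergeL s' []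
  | [], (k, rrow) :: r' => (k, (PySem.Dict.ofList rrow).items) :: pvMergeL [] r'
  | (ks, srow) :: s', (kr, rrow) :: r' =>
    if ks < kr then (ks, (PySem.Dict.ofList srow).items) :: pvMergeL s' ((kr, rrow) :: r')
    else if kr < ks then (kr, (PySem.Dict.ofList rrow).items) :: pvMergeL ((ks, srow) :: s') r'
    else (ks, ((PySem.Dict.ofList rrow).update srow).items) :: pvMergeL s' r'
termination_by s.length + r.length

-- merge of the key lists alone (proof helper)
def pvKeyMerge (a b : List Int) : List Int :=
  match a, b with
  | [], [] => []
  | k :: a', [] => k :: pvKeyMerge a' []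
  | [], k :: b' => k :: pvKeyMerge [] b'
  | ka :: a', kb :: b' =>
    if ka < kb then ka :: pvKeyMerge a' (kb :: b')
    else if kb < ka then kb :: pvKeyMerge (ka :: a') b'
    else ka :: pvKeyMerge a' b'
termination_by a.length + b.length

theorem pv_mem_keyMerge (a b : List Int) (x : Int) :
    x ∈ pvKeyMerge a b ↔ x ∈ a ∨ x ∈ b := by
  fun_induction pvKeyMerge a b with
  | case1 => simp
  | case2 k a' ih => simp_all
  | case3 k b' ih => simp_all
  | case4 ka a' kb b' h ih => simp_all; tauto
  | case5 ka a' kb b' h h2 ih => simp_all; tauto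
  | case6 ka a' kb b' h h2 ih =>
    have heq : ka = kb := le_antisymm (not_lt.mp h2) (not_lt.mp h)
    subst heq
    simp_all
    tauto

theorem pv_keyMerge_pairwise (a b : List Int)
    (ha : a.Pairwise (· < ·)) (hb : b.Pairwise (· < ·)) :
    (pvKeyMerge a b).Pairwise (· < ·) := by
  revert ha hb
  fun_induction pvKeyMerge a b with
  | case1 => intro _ _; simp
  | case2 k a' ih =>
    intro ha hb
    rw [List.pairwise_cons] at ha ⊢
    refine ⟨fun y hy => ?_, ih ha.2 hb⟩
    rcases (pv_mem_keyMerge _ _ y).mp hy with hy | hy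
    · exact ha.1 y hy
    · simp at hy
  | case3 k b' ih =>
    intro ha hb
    rw [List.pairwise_cons] at hb ⊢
    refine ⟨fun y hy => ?_, ih ha hb.2⟩
    rcases (pv_mem_keyMerge _ _ y).mp hy with hy | hy
    · simp at hy
    · exact hb.1 y hy
  | case4 ka a' kb b' h ih =>
    intro ha hb
    rw [List.pairwise_cons] at ha ⊢
    refine ⟨fun y hy => ?_, ih ha.2 hb⟩
    rcases (pv_mem_keyMerge _ _ y).mp hy with hy | hy
    · exact ha.1 y hy
    · rcases List.mem_cons.mp hy with rfl | hy
      · exact h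
      · exact h.trans ((List.pairwise_cons.mp hb).1 y hy)
  | case5 ka a' kb b' h h2 ih =>
    intro ha hb
    rw [List.pairwise_cons] at hb ⊢
    refine ⟨fun y hy => ?_, ih ha hb.2⟩
    rcases (pv_mem_keyMerge _ _ y).mp hy with hy | hy
    · rcases List.mem_cons.mp hy with rfl | hy
      · exact h2
      · exact h2.trans ((List.pairwise_cons.mp ha).1 y hy)
    · exact hb.1 y hy
  | case6 ka a' kb b' h h2 ih =>
    intro ha hb
    have heq : ka = kb := le_antisymm (not_lt.mp h2) (not_lt.mp h)
    rw [List.pairwise_cons] at ha hb ⊢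
    refine ⟨fun y hy => ?_, ih ha.2 hb.2⟩
    rcases (pv_mem_keyMerge _ _ y).mp hy with hy | hy
    · exact ha.1 y hy
    · exact heq ▸ hb.1 y hy

-- pvJoin only ever inserts fresh keys, so its items are out.items ++ the pure merge list
theorem pv_join_items (s r : List (Int × List (String × Int)))
    (out : PySem.Dict Int (List (String × Int)))
    (hs : (s.map (·.1)).Pairwise (· < ·)) (hr : (r.map (·.1)).Pairwise (· < ·))
    (hf : ∀ k, (k ∈ s.map (·.1) ∨ k ∈ r.map (·.1)) → out.contains k = false) :
    (pvJoin s r out).items = out.items ++ pvMergeL s r := by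
  revert hs hr hf
  fun_induction pvJoin s r out with
  | case1 out => intro _ _ _; simp [pvMergeL]
  | case2 out k srow s' ih =>
    intro hs hr hf
    rw [List.map_cons, List.pairwise_cons] at hs
    have hc : out.contains k = false := hf k (by simp)
    rw [pvMergeL, ih hs.2 (by simp)]
    · rw [PySem.Dict.items_insert, hc]
      simp
    · intro x hx
      rcases hx with hx | hx
      · have hlt := hs.1 x hx
        rw [PySem.Dict.contains_insert]
        simp [hf x (Or.inl (by rw [List.map_cons]; exact List.mem_cons_of_mem _ hx)), show ¬ x = k by omega]
      · simp at hx
  | case3 out k rrow r' ih =>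
    intro hs hr hf
    rw [List.map_cons, List.pairwise_cons] at hr
    have hc : out.contains k = false := hf k (by simp)
    rw [pvMergeL, ih (by simp) hr.2]
    · rw [PySem.Dict.items_insert, hc]
      simp
    · intro x hx
      rcases hx with hx | hx
      · simp at hx
      · have hlt := hr.1 x hx
        rw [PySem.Dict.contains_insert]
        simp [hf x (Or.inr (by rw [List.map_cons]; exact List.mem_cons_of_mem _ hx)), show ¬ x = k by omega]
  | case4 out ks srow s' kr rrow r' h ih =>
    intro hs hr hf
    rw [List.map_cons, List.pairwise_cons] at hs
    have hrc := List.pairwise_cons.mp (by rw [List.map_cons] at hr; exact hr)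
    have hc : out.contains ks = false := hf ks (by simp)
    rw [pvMergeL, if_pos h, ih hs.2 hr]
    · rw [PySem.Dict.items_insert, hc]
      simp
    · intro x hx
      have hxne : ¬ x = ks := by
        rcases hx with hx | hx
        · have := hs.1 x hx; omega
        · rcases List.mem_cons.mp (by rw [List.map_cons] at hx; exact hx) with rfl | hx'
          · omega
          · have := hrc.1 x hx'; omega
      rw [PySem.Dict.contains_insert]
      have hmem : x ∈ List.map (fun p => p.1) ((ks, srow) :: s') ∨ x ∈ List.map (fun p => p.1) ((kr, rrow) :: r') := by
        rcases hx with hx | hx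
        · exact Or.inl (by rw [List.map_cons]; exact List.mem_cons_of_mem _ hx)
        · exact Or.inr hx
      simp [hf x hmem, hxne]
  | case5 out ks srow s' kr rrow r' h h2 ih =>
    intro hs hr hf
    rw [List.map_cons, List.pairwise_cons] at hr
    have hsc := List.pairwise_cons.mp (by rw [List.map_cons] at hs; exact hs)
    have hc : out.contains kr = false := hf kr (by simp)
    rw [pvMergeL, if_neg h, if_pos h2, ih hs hr.2]
    · rw [PySem.Dict.items_insert, hc]
      simp
    · intro x hx
      have hxne : ¬ x = kr := by
        rcases hx with hx | hx
        · rcases List.mem_cons.mp (by rw [List.map_cons] at hx; exact hx) with rfl | hx'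
          · omega
          · have := hsc.1 x hx'; omega
        · have := hr.1 x hx; omega
      rw [PySem.Dict.contains_insert]
      have hmem : x ∈ List.map (fun p => p.1) ((ks, srow) :: s') ∨ x ∈ List.map (fun p => p.1) ((kr, rrow) :: r') := by
        rcases hx with hx | hx
        · exact Or.inl hx
        · exact Or.inr (by rw [List.map_cons]; exact List.mem_cons_of_mem _ hx)
      simp [hf x hmem, hxne]
  | case6 out ks srow s' kr rrow r' h h2 ih =>
    intro hs hr hf
    have heq : ks = kr := le_antisymm (not_lt.mp h2) (not_lt.mp h)
    rw [List.map_cons, List.pairwise_cons] at hs hr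
    have hc : out.contains ks = false := hf ks (by simp)
    rw [pvMergeL, if_neg h, if_neg h2, ih hs.2 hr.2]
    · rw [PySem.Dict.items_insert, hc]
      simp
    · intro x hx
      have hxne : ¬ x = ks := by
        rcases hx with hx | hx
        · have := hs.1 x hx; omega
        · have := hr.1 x hx; omega
      rw [PySem.Dict.contains_insert]
      have hmem : x ∈ List.map (fun p => p.1) ((ks, srow) :: s') ∨ x ∈ List.map (fun p => p.1) ((kr, rrow) :: r') := by
        rcases hx with hx | hx
        · exact Or.inl (by rw [List.map_cons]; exact List.mem_cons_of_mem _ hx)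
        · exact Or.inr (by rw [List.map_cons]; exact List.mem_cons_of_mem _ hx)
      simp [hf x hmem, hxne]

-- getD through a cons cell of an assoc list
theorem pv_getD_mk_cons (k x : Int) (v : List (String × Int)) (rest : List (Int × List (String × Int))) :
    (PySem.Dict.mk ((k, v) :: rest)).getD x [] = if k = x then v else (PySem.Dict.mk rest).getD x [] := by
  rw [PySem.Dict.getD_eq_get?_getD, PySem.Dict.get?_mk_cons, PySem.Dict.getD_eq_get?_getD]
  by_cases h : k = x <;> simp [h]

theorem pv_getD_mk_not_mem (l : List (Int × List (String × Int))) (x : Int) (h : x ∉ l.map (·.1)) :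
    (PySem.Dict.mk l).getD x [] = [] := by
  apply PySem.Dict.getD_of_not_contains
  rw [← Bool.not_eq_true, PySem.Dict.contains_iff_mem_keys]
  exact h

-- the pure merge list is the key merge decorated with A's merged row for each key
theorem pv_mergeL_eq (s r : List (Int × List (String × Int)))
    (hs : (s.map (·.1)).Pairwise (· < ·)) (hr : (r.map (·.1)).Pairwise (· < ·)) :
    pvMergeL s r = (pvKeyMerge (s.map (·.1)) (r.map (·.1))).map
      (fun k => (k, (((PySem.Dict.empty : PySem.Dict String Int).update ((PySem.Dict.mk r).getD k [])).update ((PySem.Dict.mk s).getD k [])).items)) := by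
  revert hs hr
  fun_induction pvMergeL s r with
  | case1 => intro _ _; simp [pvKeyMerge]
  | case2 k srow s' ih =>
    intro hs hr
    rw [List.map_cons, List.pairwise_cons] at hs
    rw [List.map_cons]
    simp only [List.map_nil, pvKeyMerge]
    rw [List.map_cons]
    refine List.cons_eq_cons.mpr ⟨?_, ?_⟩
    · rw [pv_getD_mk_cons, if_pos rfl]
      rfl
    · rw [ih hs.2 hr]
      apply List.map_congr_left
      intro y hy
      have hy' : y ∈ s'.map (·.1) := by
        rcases (pv_mem_keyMerge _ _ y).mp hy with hy | hy
        · exact hy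
        · simp at hy
      have hne : ¬ k = y := by have := hs.1 y hy'; omega
      have hx : (PySem.Dict.mk ((k, srow) :: s')).getD y [] = (PySem.Dict.mk s').getD y [] := by
        rw [pv_getD_mk_cons, if_neg hne]
      rw [hx]
  | case3 k rrow r' ih =>
    intro hs hr
    rw [List.map_cons, List.pairwise_cons] at hr
    rw [List.map_cons]
    simp only [List.map_nil, pvKeyMerge]
    rw [List.map_cons]
    refine List.cons_eq_cons.mpr ⟨?_, ?_⟩
    · rw [pv_getD_mk_cons, if_pos rfl]
      rfl
    · rw [ih hs hr.2]
      apply List.map_congr_left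
      intro y hy
      have hy' : y ∈ r'.map (·.1) := by
        rcases (pv_mem_keyMerge _ _ y).mp hy with hy | hy
        · simp at hy
        · exact hy
      have hne : ¬ k = y := by have := hr.1 y hy'; omega
      have hx : (PySem.Dict.mk ((k, rrow) :: r')).getD y [] = (PySem.Dict.mk r').getD y [] := by
        rw [pv_getD_mk_cons, if_neg hne]
      rw [hx]
  | case4 ks srow s' kr rrow r' h ih =>
    intro hs hr
    rw [List.map_cons, List.pairwise_cons] at hs
    have hr' := List.pairwise_cons.mp (by rw [List.map_cons] at hr; exact hr)
    rw [List.map_cons, List.map_cons, pvKeyMerge, if_pos h]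
    rw [List.map_cons]
    refine List.cons_eq_cons.mpr ⟨?_, ?_⟩
    · have hnm : ks ∉ ((kr, rrow) :: r').map (·.1) := by
        rw [List.map_cons]
        intro hmem
        rcases List.mem_cons.mp hmem with h' | h'
        · omega
        · have := hr'.1 ks h'; omega
      rw [pv_getD_mk_not_mem _ _ hnm, pv_getD_mk_cons, if_pos rfl]
      rfl
    · rw [ih hs.2 hr]
      apply List.map_congr_left
      intro y hy
      have hne : ¬ ks = y := by
        rcases (pv_mem_keyMerge _ _ y).mp hy with hy | hy
        · have := hs.1 y hy; omega
        · rcases List.mem_cons.mp (by rw [List.map_cons] at hy; exact hy) with rfl | hy'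
          · omega
          · have := hr'.1 y hy'; omega
      have hx : (PySem.Dict.mk ((ks, srow) :: s')).getD y [] = (PySem.Dict.mk s').getD y [] := by
        rw [pv_getD_mk_cons, if_neg hne]
      rw [hx]
  | case5 ks srow s' kr rrow r' h h2 ih =>
    intro hs hr
    rw [List.map_cons, List.pairwise_cons] at hr
    have hs' := List.pairwise_cons.mp (by rw [List.map_cons] at hs; exact hs)
    rw [List.map_cons, List.map_cons, pvKeyMerge, if_neg h, if_pos h2]
    rw [List.map_cons]
    refine List.cons_eq_cons.mpr ⟨?_, ?_⟩
    · have hnm : kr ∉ ((ks, srow) :: s').map (·.1) := by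
        rw [List.map_cons]
        intro hmem
        rcases List.mem_cons.mp hmem with h' | h'
        · omega
        · have := hs'.1 kr h'; omega
      rw [pv_getD_mk_not_mem _ _ hnm, pv_getD_mk_cons, if_pos rfl]
      rfl
    · rw [ih hs hr.2]
      apply List.map_congr_left
      intro y hy
      have hne : ¬ kr = y := by
        rcases (pv_mem_keyMerge _ _ y).mp hy with hy | hy
        · rcases List.mem_cons.mp (by rw [List.map_cons] at hy; exact hy) with rfl | hy'
          · omega
          · have := hs'.1 y hy'; omega
        · have := hr.1 y hy; omega
      have hx : (PySem.Dict.mk ((kr, rrow) :: r')).getD y [] = (PySem.Dict.mk r').getD y [] := by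
        rw [pv_getD_mk_cons, if_neg hne]
      rw [hx]
  | case6 ks srow s' kr rrow r' h h2 ih =>
    intro hs hr
    have heq : ks = kr := le_antisymm (not_lt.mp h2) (not_lt.mp h)
    rw [List.map_cons, List.pairwise_cons] at hs hr
    rw [List.map_cons, List.map_cons, pvKeyMerge, if_neg h, if_neg h2]
    rw [List.map_cons]
    refine List.cons_eq_cons.mpr ⟨?_, ?_⟩
    · rw [pv_getD_mk_cons, if_pos heq.symm, pv_getD_mk_cons, if_pos rfl]
      rfl
    · rw [ih hs.2 hr.2]
      apply List.map_congr_left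
      intro y hy
      have hys : ¬ ks = y := by
        rcases (pv_mem_keyMerge _ _ y).mp hy with hy | hy
        · have := hs.1 y hy; omega
        · have := hr.1 y hy; omega
      have hyr : ¬ kr = y := by rw [← heq]; exact hys
      have hx1 : (PySem.Dict.mk ((ks, srow) :: s')).getD y [] = (PySem.Dict.mk s').getD y [] := by
        rw [pv_getD_mk_cons, if_neg hys]
      have hx2 : (PySem.Dict.mk ((kr, rrow) :: r')).getD y [] = (PySem.Dict.mk r').getD y [] := by
        rw [pv_getD_mk_cons, if_neg hyr]
      rw [hx1, hx2]

-- getD on a Dict.mk of a permuted nodup assoc list agrees with the original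
theorem pv_getD_mk_perm (l l' : List (Int × List (String × Int)))
    (hp : l.Perm l') (hnd : (l.map (·.1)).Nodup) (k : Int) :
    (PySem.Dict.mk l).getD k [] = (PySem.Dict.mk l').getD k [] := by
  have hnd' : (l'.map (·.1)).Nodup := ((hp.map (·.1)).nodup_iff).mp hnd
  by_cases hk : k ∈ l.map (·.1)
  · obtain ⟨p, hpmem, hpk⟩ := List.mem_map.mp hk
    have h1 : (PySem.Dict.mk l).get? k = some p.2 := by
      apply PySem.Dict.get?_of_mem_items
      · show (k, p.2) ∈ l; subst hpk; exact hpmem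
      · show (l.map (·.1)).Nodup; exact hnd
    have h2 : (PySem.Dict.mk l').get? k = some p.2 := by
      apply PySem.Dict.get?_of_mem_items
      · show (k, p.2) ∈ l'; subst hpk; exact hp.mem_iff.mp hpmem
      · show (l'.map (·.1)).Nodup; exact hnd'
    rw [PySem.Dict.getD_eq_get?_getD, h1, PySem.Dict.getD_eq_get?_getD, h2]
  · have h1 : (PySem.Dict.mk l).contains k = false := by
      rw [← Bool.not_eq_true, PySem.Dict.contains_iff_mem_keys]; exact hk
    have h2 : (PySem.Dict.mk l').contains k = false := by
      rw [← Bool.not_eq_true, PySem.Dict.contains_iff_mem_keys]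
      show k ∉ l'.map (·.1)
      exact fun h => hk ((hp.map (·.1)).mem_iff.mpr h)
    rw [PySem.Dict.getD_of_not_contains _ _ h1, PySem.Dict.getD_of_not_contains _ _ h2]

theorem merge_oracle_py_spec_aux (summary_rows receipt_rows : List (Int × List (String × Int)))
    (hpre : Pre_merge_oracle_py summary_rows receipt_rows) :
    merge_oracle_py summary_rows receipt_rows = merge_oracle_py_alt summary_rows receipt_rows := by
  obtain ⟨hs, hr⟩ := hpre
  unfold merge_oracle_py merge_oracle_py_alt
  dsimp only
  set ss := PySem.List.sorted summary_rows (fun p => p.1) false with hss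
  set rr := PySem.List.sorted receipt_rows (fun p => p.1) false with hrr
  have hps : ss.Perm summary_rows := PySem.List.sorted_perm _ _ _
  have hpr : rr.Perm receipt_rows := PySem.List.sorted_perm _ _ _
  have hsnd : (ss.map (·.1)).Nodup := ((hps.map (·.1)).nodup_iff).mpr hs
  have hrnd : (rr.map (·.1)).Nodup := ((hpr.map (·.1)).nodup_iff).mpr hr
  have hsp : (ss.map (·.1)).Pairwise (· < ·) := by
    have hle : ss.Pairwise (fun a b => a.1 ≤ b.1) := PySem.List.sorted_pairwise _ _
    have hne : ss.Pairwise (fun a b => a.1 ≠ b.1) := List.pairwise_map.mp hsnd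
    exact List.pairwise_map.mpr ((hle.and hne).imp (fun hpq => lt_of_le_of_ne hpq.1 hpq.2))
  have hrp : (rr.map (·.1)).Pairwise (· < ·) := by
    have hle : rr.Pairwise (fun a b => a.1 ≤ b.1) := PySem.List.sorted_pairwise _ _
    have hne : rr.Pairwise (fun a b => a.1 ≠ b.1) := List.pairwise_map.mp hrnd
    exact List.pairwise_map.mpr ((hle.and hne).imp (fun hpq => lt_of_le_of_ne hpq.1 hpq.2))
  -- B's side: the join is the pure merge list, i.e. the decorated key merge
  rw [pv_join_items ss rr _ hsp hrp (by intro k _; rfl)]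
  rw [pv_mergeL_eq ss rr hsp hrp]
  -- the sorted union of the key sets IS the key merge of the two sorted key lists
  have hkm := pv_keyMerge_pairwise (ss.map (·.1)) (rr.map (·.1)) hsp hrp
  have hframes : PySem.List.sorted
      (PySem.Set.union (PySem.Set.ofList (summary_rows.map (·.1))) (receipt_rows.map (·.1)))
      (fun x => x) false = pvKeyMerge (ss.map (·.1)) (rr.map (·.1)) := by
    apply PySem.List.sorted_eq_of_perm_of_pairwise_lt
    · rw [List.perm_ext_iff_of_nodup (hkm.imp ne_of_lt)
        (PySem.Set.nodup_union _ _ (PySem.Set.nodup_ofList _))]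
      intro a
      rw [pv_mem_keyMerge]
      simp only [PySem.Set.mem_union, PySem.Set.mem_ofList]
      rw [(hps.map (·.1)).mem_iff, (hpr.map (·.1)).mem_iff]
    · exact hkm
  rw [hframes]
  -- A's side: inserting the fresh distinct merged keys just lists them in order
  have hfnd : (pvKeyMerge (ss.map (·.1)) (rr.map (·.1))).Nodup := hkm.imp ne_of_lt
  have hA := PySem.Dict.items_foldl_insert_fresh (pvKeyMerge (ss.map (·.1)) (rr.map (·.1)))
    (fun idx => idx)
    (fun idx => (((PySem.Dict.empty : PySem.Dict String Int).update ((PySem.Dict.mk receipt_rows).getD idx [])).update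
        ((PySem.Dict.mk summary_rows).getD idx [])).items)
    PySem.Dict.empty (by intro a _; rfl) (by simpa using hfnd)
  rw [show (PySem.Dict.empty : PySem.Dict Int (List (String × Int))).items = [] from rfl] at hA
  rw [hA, List.nil_append]
  -- pointwise: the sorted copies index the same rows as the originals
  apply List.map_congr_left
  intro y _
  dsimp only
  rw [pv_getD_mk_perm summary_rows ss hps.symm hs y, pv_getD_mk_perm receipt_rows rr hpr.symm hr y]

-- ===== VERDICT (by name: the statement is the Claim_ definition above) =====
theorem merge_oracle_py_spec : Claim_equal_merge_oracle_py := by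
  intro summary_rows receipt_rows _ hpre
  exact merge_oracle_py_spec_aux summary_rows receipt_rows hpre
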